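-- pv_equiv track=rewrite | github.com/sebastiandeluca/leetcodes | user-friendly-pw.py | authEvents
-- ===== SOURCE A (Python) =====
-- def authEvents(events):
--     M = pow(10,9) + 7
--     p = 131
--
--     def calc(data):
--         ans = 0
--         for i, num in enumerate(reversed(data)):
--             ans += ord(num)*pow(p,i,M)%M
--         return ans%M
--
--     ans = []
--     for event,data in events:
--         if event == 'setPassword':
--             db = set()
--             og = calc(str(data))
--             db.add(str(og))
--             og = og*p%M
--             for i in range(48,58):
--                 db.add(str((og + i)%M))
--             for i in range(65,91):
--                 db.add(str((og+i)%M))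
--             for i in range(97,123):
--                 db.add(str((og+i)%M))
--
--         elif event == 'authorize':
--             if data in db:
--                 ans.append(1)
--             else:
--                 ans.append(0)
--     return ans
-- ===== SOURCE B (Python) =====
-- def authEvents(events):
--     M = 10**9 + 7
--     p = 131
--     h = 0
--     ans = []
--     for event, data in events:
--         if event == 'setPassword':
--             h = 0
--             for ch in data:
--                 h = (h * p + ord(ch)) % M
--         elif event == 'authorize':
--             ok = 0
--             if data.isdigit():
--                 q = 0
--                 for ch in data:
--                     q = q * 10 + (ord(ch) - 48)
--                 if q < M and str(q) == data:
--                     c = (q - h * p) % M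
--                     if q == h or 48 <= c < 58 or 65 <= c < 91 or 97 <= c < 123:
--                         ok = 1
--             ans.append(ok)
--     return ans
-- ===== Notes on version B (the rewrite author's own statement) =====
-- stated objective: faster
-- what changed: A precomputes, per setPassword, a 63-string candidate set (hash plus all one-alphanumeric-append hashes, each char hashed with pow(p,i,M)) and answers authorize by set membership; B stores only the Horner hash h of the current password and answers each authorize arithmetically by parsing the digit query q (with str(q)==data as canonicality check) and testing q==h or (q-h*p)%M in an alphanumeric code range.
import Mathlib
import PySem

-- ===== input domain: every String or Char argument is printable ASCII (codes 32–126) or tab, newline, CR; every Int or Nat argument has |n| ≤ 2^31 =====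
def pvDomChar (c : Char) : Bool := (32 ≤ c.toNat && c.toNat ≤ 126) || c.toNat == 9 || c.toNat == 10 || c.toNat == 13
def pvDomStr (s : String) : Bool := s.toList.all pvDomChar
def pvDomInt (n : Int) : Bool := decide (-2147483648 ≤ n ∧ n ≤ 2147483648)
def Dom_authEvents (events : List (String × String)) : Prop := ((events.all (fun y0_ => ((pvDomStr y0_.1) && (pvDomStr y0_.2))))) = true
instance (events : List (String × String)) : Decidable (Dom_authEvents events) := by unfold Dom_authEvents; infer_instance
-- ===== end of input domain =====

-- B replaces A's per-password candidate-set construction (63 hash strings in a set, membership per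
-- query) by storing only the Horner hash h of the current password and answering each authorize
-- query arithmetically: parse the digit string q, check canonicality via str(q) == data, and test
-- q == h or (q - h*p) % M landing in an alphanumeric code range; objective: faster (Horner pass
-- instead of a modular exponentiation per character, and no 63-string set per setPassword; the
-- timing run's generated inputs were too small to measure the difference).


-- ===== PORT A =====
-- calc(data): ans += ord(num)*pow(p,i,M)%M over enumerate(reversed(data)); return ans%M
def pvCalcA (data : String) : Int :=
  let ans := (PySem.List.enumerate data.toList.reverse).foldl
    (fun ans ic =>
      ans + PySem.Int.mod ((ic.2.toNat : Int) * PySem.Int.powMod 131 ic.1.toNat 1000000007) 1000000007)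
    0
  PySem.Int.mod ans 1000000007

-- one step of A's event loop (db undefined before the first setPassword is excluded by Pre_;
-- the port starts from the empty set there)
def pvStepA (st : PySem.Set String × List Int) (ed : String × String) : PySem.Set String × List Int :=
  let db := st.1
  let ans := st.2
  if ed.1 == "setPassword" then
    let og := pvCalcA ed.2              -- str(data) = data (data is a string)
    let db := PySem.Set.add PySem.Set.empty (PySem.Int.toStr og)
    let og := PySem.Int.mod (og * 131) 1000000007
    let db := (PySem.List.pyRange 48 58).foldl
      (fun db i => PySem.Set.add db (PySem.Int.toStr (PySem.Int.mod (og + i) 1000000007))) db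
    let db := (PySem.List.pyRange 65 91).foldl
      (fun db i => PySem.Set.add db (PySem.Int.toStr (PySem.Int.mod (og + i) 1000000007))) db
    let db := (PySem.List.pyRange 97 123).foldl
      (fun db i => PySem.Set.add db (PySem.Int.toStr (PySem.Int.mod (og + i) 1000000007))) db
    (db, ans)
  else if ed.1 == "authorize" then
    (db, ans ++ [if PySem.Set.contains db ed.2 then (1 : Int) else 0])
  else
    (db, ans)

def authEvents (events : List (String × String)) : List Int :=
  (events.foldl pvStepA (PySem.Set.empty, [])).2

-- ===== PORT B =====
-- B keeps only the Horner hash h of the current password; an authorize event is answered by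
-- parsing the query as a decimal number q (guarded by isdigit and the canonicality check
-- str(q) == data) and testing q == h or (q - h*p) % M in an alphanumeric code range.
def pvStepB (st : Int × List Int) (ed : String × String) : Int × List Int :=
  if ed.1 == "setPassword" then
    (ed.2.toList.foldl (fun h c => PySem.Int.mod (h * 131 + (c.toNat : Int)) 1000000007) 0, st.2)
  else if ed.1 == "authorize" then
    let ok : Int :=
      if PySem.Str.strIsdigit ed.2 then
        let q := ed.2.toList.foldl (fun q c => q * 10 + ((c.toNat : Int) - 48)) 0
        if q < 1000000007 ∧ PySem.Int.toStr q = ed.2 then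
          let c := PySem.Int.mod (q - st.1 * 131) 1000000007
          if q = st.1 ∨ (48 ≤ c ∧ c < 58) ∨ (65 ≤ c ∧ c < 91) ∨ (97 ≤ c ∧ c < 123) then 1 else 0
        else 0
      else 0
    (st.1, st.2 ++ [ok])
  else
    st

def authEvents_alt (events : List (String × String)) : List Int :=
  (events.foldl pvStepB (0, [])).2

-- ===== PRECONDITION & SPEC =====
-- Pre_ excludes exactly the inputs with an 'authorize' event before any 'setPassword' event:
-- there Python A raises NameError (db is not yet defined).
def Pre_authEvents (events : List (String × String)) : Prop :=
  ((events.takeWhile (fun e => e.1 != "setPassword")).all (fun e => e.1 != "authorize")) = true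
instance (events : List (String × String)) : Decidable (Pre_authEvents events) := by
  unfold Pre_authEvents; infer_instance

def pvWitness_authEvents : (List (String × String)) := [("setPassword", "a"), ("authorize", "97")]

def Spec_authEvents (events : List (String × String)) (out : List Int) : Prop := out = authEvents_alt events
instance (events : List (String × String)) (out : List Int) : Decidable (Spec_authEvents events out) := by unfold Spec_authEvents; infer_instance

-- ===== CLAIM (what is proved, stated in full; the proofs are below) =====
def Claim_equal_authEvents : Prop := ∀ (events : List (String × String)), Dom_authEvents events → Pre_authEvents events → Spec_authEvents events (authEvents events)

-- ===== LEMMAS AND PROOFS =====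

-- (c * (X % M)) % M = (c * X) % M
lemma pv_mul_emod_right (c X M : Int) : (c * (X % M)) % M = (c * X) % M := by
  conv_lhs => rw [Int.mul_emod]
  rw [Int.emod_emod_of_dvd _ dvd_rfl, ← Int.mul_emod]

-- big-endian polynomial value of a reversed string: R (c :: t) = ord c + 131 * R t
def pvR : List Char → Int
  | [] => 0
  | c :: t => (c.toNat : Int) + 131 * pvR t

-- the plain (un-reduced) Horner value
def pvV (cs : List Char) : Int := cs.foldl (fun h c => h * 131 + (c.toNat : Int)) 0

-- B's Horner loop, as a named function for the proofs (definitionally the fold in pvStepB)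
def pvHashB (data : String) : Int :=
  data.toList.foldl (fun h c => PySem.Int.mod (h * 131 + (c.toNat : Int)) 1000000007) 0

lemma pvR_append (u : List Char) (c : Char) :
    pvR (u ++ [c]) = pvR u + (c.toNat : Int) * 131 ^ u.length := by
  induction u with
  | nil => simp [pvR]
  | cons d v ih => simp only [List.cons_append, pvR, ih, List.length_cons]; ring

lemma pvV_eq_R (cs : List Char) : pvV cs = pvR cs.reverse := by
  suffices h : ∀ a, cs.foldl (fun h c => h * 131 + (c.toNat : Int)) a
      = pvR cs.reverse + a * 131 ^ cs.length by
    simpa [pvV] using h 0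
  induction cs with
  | nil => intro a; simp [pvR]
  | cons c t ih =>
    intro a
    simp only [List.foldl_cons, List.reverse_cons, List.length_cons, ih,
      pvR_append, List.length_reverse]
    ring

-- B's Horner fold is the mod-M reduction of the plain Horner value
lemma pvHashB_eq_mod (data : String) : pvHashB data = PySem.Int.mod (pvV data.toList) 1000000007 := by
  unfold pvHashB pvV
  rw [PySem.Int.mod_eq_emod_of_pos (by norm_num)]
  suffices h : ∀ (cs : List Char) (a : Int),
      cs.foldl (fun h c => PySem.Int.mod (h * 131 + (c.toNat : Int)) 1000000007) (a % 1000000007)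
        = (cs.foldl (fun h c => h * 131 + (c.toNat : Int)) a) % 1000000007 by
    simpa using h data.toList 0
  intro cs
  induction cs with
  | nil => intro a; simp
  | cons c t ih =>
    intro a
    simp only [List.foldl_cons]
    rw [PySem.Int.mod_eq_emod_of_pos (by norm_num)]
    have h1 : (a % 1000000007 * 131 + (c.toNat : Int)) % 1000000007
        = (a * 1000000007 * 0 + (a * 131 + (c.toNat : Int))) % 1000000007 := by
      have := pv_mul_emod_right 131 a 1000000007
      omega
    simp only [mul_zero, zero_add] at h1
    rw [h1, ← ih (a * 131 + (c.toNat : Int))]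

-- A's calc fold, with start index k, computes a + 131^k * R rev modulo M
lemma pvCalcA_fold (rev : List Char) : ∀ (k : Nat) (a : Int),
    ((PySem.List.enumerate rev (k : Int)).foldl
      (fun ans ic =>
        ans + PySem.Int.mod ((ic.2.toNat : Int) * PySem.Int.powMod 131 ic.1.toNat 1000000007) 1000000007)
      a) % 1000000007
    = (a + 131 ^ k * pvR rev) % 1000000007 := by
  induction rev with
  | nil => intro k a; simp [PySem.List.enumerate_nil, pvR]
  | cons c t ih =>
    intro k a
    rw [PySem.List.enumerate_cons]
    simp only [List.foldl_cons]
    have hk : ((k : Int) + 1) = ((k + 1 : Nat) : Int) := by push_cast; ring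
    rw [hk, ih (k + 1)]
    have htn : ((k : Int)).toNat = k := by omega
    simp only [htn, PySem.Int.powMod, PySem.Int.mod_eq_emod_of_pos (b := (1000000007:Int)) (by norm_num)]
    have h2 : ((c.toNat : Int) * (131 ^ k % 1000000007)) % 1000000007
        = ((c.toNat : Int) * 131 ^ k) % 1000000007 := pv_mul_emod_right _ _ _
    have h3 : 131 ^ (k + 1) * pvR t = 131 ^ k * (131 * pvR t) := by ring
    simp only [pvR, h3]
    have h4 : a + 131 ^ k * ((c.toNat : Int) + 131 * pvR t)
        = a + (c.toNat : Int) * 131 ^ k + 131 ^ k * (131 * pvR t) := by ring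
    rw [h4]
    omega

-- A's calc equals B's Horner hash
lemma pvCalcA_eq_hashB (data : String) : pvCalcA data = pvHashB data := by
  rw [pvHashB_eq_mod, pvV_eq_R]
  unfold pvCalcA
  rw [PySem.Int.mod_eq_emod_of_pos (by norm_num),
      PySem.Int.mod_eq_emod_of_pos (by norm_num)]
  have := pvCalcA_fold data.toList.reverse 0 0
  simpa using this

-- the Horner hash lies in [0, M)
-- the Horner hash lies in [0, M)
lemma pvHashB_range (data : String) : 0 ≤ pvHashB data ∧ pvHashB data < 1000000007 := by
  unfold pvHashB
  suffices h : ∀ (cs : List Char) (a : Int), 0 ≤ a → a < 1000000007 →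
      0 ≤ cs.foldl (fun h c => PySem.Int.mod (h * 131 + (c.toNat : Int)) 1000000007) a ∧
      cs.foldl (fun h c => PySem.Int.mod (h * 131 + (c.toNat : Int)) 1000000007) a < 1000000007 by
    exact h data.toList 0 (by norm_num) (by norm_num)
  intro cs
  induction cs with
  | nil => intro a h0 h1; exact ⟨h0, h1⟩
  | cons c t ih =>
    intro a h0 h1
    exact ih _ (PySem.Int.mod_nonneg _ (by norm_num)) (PySem.Int.mod_lt _ (by norm_num))

-- the db A builds after a setPassword whose calc-value is h
def pvDb (h : Int) : PySem.Set String :=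
  let og := PySem.Int.mod (h * 131) 1000000007
  let db := PySem.Set.add PySem.Set.empty (PySem.Int.toStr h)
  let db := (PySem.List.pyRange 48 58).foldl
    (fun db i => PySem.Set.add db (PySem.Int.toStr (PySem.Int.mod (og + i) 1000000007))) db
  let db := (PySem.List.pyRange 65 91).foldl
    (fun db i => PySem.Set.add db (PySem.Int.toStr (PySem.Int.mod (og + i) 1000000007))) db
  (PySem.List.pyRange 97 123).foldl
    (fun db i => PySem.Set.add db (PySem.Int.toStr (PySem.Int.mod (og + i) 1000000007))) db

lemma pvStepA_set (st : PySem.Set String × List Int) (ed : String × String)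
    (h : ed.1 = "setPassword") : pvStepA st ed = (pvDb (pvCalcA ed.2), st.2) := by
  simp [pvStepA, pvDb, h]

lemma mem_pvDb (h : Int) (y : String) :
    y ∈ pvDb h ↔ y = PySem.Int.toStr h ∨
      ∃ i : Int, ((48 ≤ i ∧ i < 58) ∨ (65 ≤ i ∧ i < 91) ∨ (97 ≤ i ∧ i < 123)) ∧
        y = PySem.Int.toStr (PySem.Int.mod (PySem.Int.mod (h * 131) 1000000007 + i) 1000000007) := by
  simp only [pvDb, PySem.Set.mem_foldl_add, PySem.Set.mem_add, PySem.List.mem_pyRange_one]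
  constructor
  · rintro (((((h|h)|⟨i,hi,rfl⟩)|⟨i,hi,rfl⟩)|⟨i,hi,rfl⟩))
    · simp [PySem.Set.empty] at h
    · exact Or.inl h
    all_goals exact Or.inr ⟨i, by tauto, rfl⟩
  · rintro (rfl|⟨i,(hi|hi|hi),rfl⟩)
    · exact Or.inl (Or.inl (Or.inl (Or.inr rfl)))
    · exact Or.inl (Or.inl (Or.inr ⟨i, hi, rfl⟩))
    · exact Or.inl (Or.inr ⟨i, hi, rfl⟩)
    · exact Or.inr ⟨i, hi, rfl⟩

-- ---- decimal digits machinery ----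
-- big-endian decimal digit characters of n (no leading zeros)
def pvDigits (n : Nat) : List Char :=
  if n < 10 then [Nat.digitChar n]
  else pvDigits (n / 10) ++ [Nat.digitChar (n % 10)]
decreasing_by exact Nat.div_lt_self (by omega) (by omega)

lemma pvToDigitsCore_eq : ∀ (f n : Nat) (acc : List Char), n < f →
    Nat.toDigitsCore 10 f n acc = pvDigits n ++ acc := by
  intro f
  induction f with
  | zero => intro n acc h; omega
  | succ f ih =>
    intro n acc h
    rw [pvDigits]
    simp only [Nat.toDigitsCore]
    by_cases h10 : n < 10
    · have : n / 10 = 0 := Nat.div_eq_of_lt h10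
      simp [this, Nat.mod_eq_of_lt h10, h10]
    · have hne : ¬ (n / 10 = 0) := by omega
      simp only [hne, if_false, h10, if_false]
      rw [ih (n / 10) _ (by omega)]
      simp

lemma pvToChars_nat (m : Nat) : PySem.Int.toChars (m : Int) = pvDigits m := by
  have : ¬ ((m : Int) < 0) := by omega
  simp only [PySem.Int.toChars, this, if_false, Int.toNat_natCast]
  show Nat.toDigitsCore 10 (m + 1) m [] = pvDigits m
  rw [pvToDigitsCore_eq (m + 1) m [] (by omega)]
  simp

lemma pvDigitChar_toNat (d : Nat) (h : d < 10) : (Nat.digitChar d).toNat = 48 + d := by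
  interval_cases d <;> rfl

lemma pvDigitChar_isdigit (d : Nat) (h : d < 10) : PySem.Chars.isdigit (Nat.digitChar d) = true := by
  interval_cases d <;> decide

lemma pvDigits_ne_nil (n : Nat) : pvDigits n ≠ [] := by
  rw [pvDigits]; split <;> simp

lemma pvDigits_all_digit (n : Nat) : ∀ c ∈ pvDigits n, PySem.Chars.isdigit c = true := by
  induction n using Nat.strong_induction_on with
  | _ n ih =>
    rw [pvDigits]
    split
    · next h => intro c hc; simp at hc; subst hc; exact pvDigitChar_isdigit n h
    · next h =>
      intro c hc
      simp only [List.mem_append, List.mem_singleton] at hc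
      rcases hc with hc | rfl
      · exact ih (n / 10) (Nat.div_lt_self (by omega) (by omega)) c hc
      · exact pvDigitChar_isdigit (n % 10) (Nat.mod_lt _ (by omega))

-- value of the parse fold over the digit characters of n
lemma pvFold10_pvDigits (n : Nat) : ∀ a : Int,
    (pvDigits n).foldl (fun q c => q * 10 + ((c.toNat : Int) - 48)) a
      = a * 10 ^ (pvDigits n).length + n := by
  induction n using Nat.strong_induction_on with
  | _ n ih =>
    intro a
    rw [pvDigits]
    split
    · next h =>
      simp [pvDigitChar_toNat n h]
    · next h =>
      rw [List.foldl_append, ih (n / 10) (Nat.div_lt_self (by omega) (by omega)) a]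
      simp only [List.foldl_cons, List.foldl_nil, List.length_append, List.length_singleton]
      rw [pvDigitChar_toNat (n % 10) (Nat.mod_lt _ (by omega))]
      have hn : (n : Int) = (n / 10 : Nat) * 10 + (n % 10 : Nat) := by
        push_cast; omega
      rw [pow_succ]
      push_cast
      ring_nf
      omega

lemma pvIsdigit_toNat {c : Char} (h : PySem.Chars.isdigit c = true) :
    48 ≤ c.toNat ∧ c.toNat ≤ 57 := by
  simp only [PySem.Chars.isdigit, Bool.and_eq_true, decide_eq_true_eq, Char.le_def] at h
  obtain ⟨h1, h2⟩ := h
  constructor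
  · exact UInt32.le_iff_toNat_le.mp h1
  · exact UInt32.le_iff_toNat_le.mp h2

lemma pvFold10_nonneg (cs : List Char) (hd : ∀ c ∈ cs, PySem.Chars.isdigit c = true) :
    ∀ a : Int, 0 ≤ a → 0 ≤ cs.foldl (fun q c => q * 10 + ((c.toNat : Int) - 48)) a := by
  induction cs with
  | nil => intro a h0; exact h0
  | cons c t ih =>
    intro a h0
    have hc := pvIsdigit_toNat (hd c (by simp))
    refine ih (fun c hc => hd c (by simp [hc])) _ ?_
    show 0 ≤ a * 10 + ((c.toNat : Int) - 48)
    omega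

-- the arithmetic inversion: for q ∈ [0,M), q = (h*131 % M + i) % M ↔ (q - h*131) % M = i
-- the arithmetic inversion: for q ∈ [0,M), q = (h*131 % M + i) % M ↔ (q - h*131) % M = i
lemma pvArith (h q i : Int) (hq0 : 0 ≤ q) (hqM : q < 1000000007) (hi0 : 0 ≤ i) (hiM : i < 1000000007) :
    q = PySem.Int.mod (PySem.Int.mod (h * 131) 1000000007 + i) 1000000007 ↔
      PySem.Int.mod (q - h * 131) 1000000007 = i := by
  rw [PySem.Int.mod_eq_emod_of_pos (by norm_num), PySem.Int.mod_eq_emod_of_pos (by norm_num),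
    PySem.Int.mod_eq_emod_of_pos (by norm_num)]
  generalize h * 131 = t
  constructor
  · rintro rfl
    omega
  · rintro rfl
    omega

-- the heart: A's set-membership test equals B's arithmetic test
-- the heart: A's set-membership test equals B's arithmetic test
lemma pvOk_eq (h : Int) (hh0 : 0 ≤ h) (hhM : h < 1000000007) (data : String) :
    (if PySem.Set.contains (pvDb h) data then (1 : Int) else 0)
      = (if PySem.Str.strIsdigit data then
          (if (data.toList.foldl (fun q c => q * 10 + ((c.toNat : Int) - 48)) 0) < 1000000007 ∧
              PySem.Int.toStr (data.toList.foldl (fun q c => q * 10 + ((c.toNat : Int) - 48)) 0) = data then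
             (if (data.toList.foldl (fun q c => q * 10 + ((c.toNat : Int) - 48)) 0) = h ∨
                 (48 ≤ PySem.Int.mod ((data.toList.foldl (fun q c => q * 10 + ((c.toNat : Int) - 48)) 0) - h * 131) 1000000007 ∧
                  PySem.Int.mod ((data.toList.foldl (fun q c => q * 10 + ((c.toNat : Int) - 48)) 0) - h * 131) 1000000007 < 58) ∨
                 (65 ≤ PySem.Int.mod ((data.toList.foldl (fun q c => q * 10 + ((c.toNat : Int) - 48)) 0) - h * 131) 1000000007 ∧
                  PySem.Int.mod ((data.toList.foldl (fun q c => q * 10 + ((c.toNat : Int) - 48)) 0) - h * 131) 1000000007 < 91) ∨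
                 (97 ≤ PySem.Int.mod ((data.toList.foldl (fun q c => q * 10 + ((c.toNat : Int) - 48)) 0) - h * 131) 1000000007 ∧
                  PySem.Int.mod ((data.toList.foldl (fun q c => q * 10 + ((c.toNat : Int) - 48)) 0) - h * 131) 1000000007 < 123) then (1 : Int) else 0)
           else 0)
         else 0) := by
  have key : ∀ v : Int, 0 ≤ v → data = PySem.Int.toStr v →
      PySem.Str.strIsdigit data = true ∧
      data.toList.foldl (fun q c => q * 10 + ((c.toNat : Int) - 48)) 0 = v := by
    intro v hv0 hd
    have hdl : data.toList = pvDigits v.toNat := by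
      rw [hd, PySem.Int.toList_toStr]
      have h2 := pvToChars_nat v.toNat
      rwa [show ((v.toNat : Nat) : Int) = v by omega] at h2
    constructor
    · rw [PySem.Str.strIsdigit_eq, hdl]
      have hne := pvDigits_ne_nil v.toNat
      simp [PySem.Chars.strIsdigit, hne, List.all_eq_true]
      exact pvDigits_all_digit _
    · rw [hdl, pvFold10_pvDigits]
      simp
      omega
  by_cases hm : data ∈ pvDb h
  · rw [if_pos ((PySem.Set.contains_iff _ _).mpr hm)]
    rcases (mem_pvDb h data).mp hm with hd | ⟨i, hi, hd⟩
    · obtain ⟨hdig, hq⟩ := key h hh0 hd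
      rw [if_pos hdig, hq, if_pos ⟨hhM, hd.symm⟩, if_pos (Or.inl rfl)]
    · have hv0 : 0 ≤ PySem.Int.mod (PySem.Int.mod (h * 131) 1000000007 + i) 1000000007 :=
        PySem.Int.mod_nonneg _ (by norm_num)
      have hvM : PySem.Int.mod (PySem.Int.mod (h * 131) 1000000007 + i) 1000000007 < 1000000007 :=
        PySem.Int.mod_lt _ (by norm_num)
      obtain ⟨hdig, hq⟩ := key _ hv0 hd
      have hi0 : (0 : Int) ≤ i := by rcases hi with ⟨a,b⟩|⟨a,b⟩|⟨a,b⟩ <;> omega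
      have hiM : i < (1000000007 : Int) := by rcases hi with ⟨a,b⟩|⟨a,b⟩|⟨a,b⟩ <;> omega
      have hc : PySem.Int.mod
          (PySem.Int.mod (PySem.Int.mod (h * 131) 1000000007 + i) 1000000007 - h * 131) 1000000007 = i :=
        (pvArith h _ i hv0 hvM hi0 hiM).mp rfl
      rw [if_pos hdig, hq, if_pos ⟨hvM, hd.symm⟩, if_pos (Or.inr (by rw [hc]; exact hi))]
  · rw [if_neg (by simp only [← PySem.Set.contains_iff (pvDb h) data] at hm; simpa using hm)]
    symm
    by_cases h1 : PySem.Str.strIsdigit data = true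
    · rw [if_pos h1]
      have hall : ∀ c ∈ data.toList, PySem.Chars.isdigit c = true := by
        rw [PySem.Str.strIsdigit_eq] at h1
        simp only [PySem.Chars.strIsdigit, Bool.and_eq_true, List.all_eq_true] at h1
        exact h1.2
      have hq0 : 0 ≤ data.toList.foldl (fun q c => q * 10 + ((c.toNat : Int) - 48)) 0 :=
        pvFold10_nonneg data.toList hall 0 le_rfl
      generalize data.toList.foldl (fun q c => q * 10 + ((c.toNat : Int) - 48)) 0 = q at hq0 ⊢
      split_ifs with h2 h3
      · exfalso
        apply hm
        obtain ⟨hqM, hds⟩ := h2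
        rcases h3 with h3 | h3
        · exact (mem_pvDb h data).mpr (Or.inl (by rw [← hds, h3]))
        · have hb0 : 0 ≤ PySem.Int.mod (q - h * 131) 1000000007 := by
            rcases h3 with ⟨a,b⟩|⟨a,b⟩|⟨a,b⟩ <;> omega
          have hbM : PySem.Int.mod (q - h * 131) 1000000007 < 1000000007 := by
            rcases h3 with ⟨a,b⟩|⟨a,b⟩|⟨a,b⟩ <;> omega
          have harith : q = PySem.Int.mod (PySem.Int.mod (h * 131) 1000000007 +
              PySem.Int.mod (q - h * 131) 1000000007) 1000000007 :=
            (pvArith h q (PySem.Int.mod (q - h * 131) 1000000007) hq0 hqM hb0 hbM).mpr rfl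
          exact (mem_pvDb h data).mpr (Or.inr ⟨PySem.Int.mod (q - h * 131) 1000000007, h3,
            by rw [← harith]; exact hds.symm⟩)
      · rfl
      · rfl
    · rw [if_neg h1]

-- synced loop: after a setPassword with hash h, A's state is (pvDb h, ans), B's is (h, ans)
lemma pvLoop_sync (evs : List (String × String)) : ∀ (h : Int) (ans : List Int),
    0 ≤ h → h < 1000000007 →
    (evs.foldl pvStepA (pvDb h, ans)).2 = (evs.foldl pvStepB (h, ans)).2 := by
  induction evs with
  | nil => intro h ans h0 h1; rfl
  | cons ed evs ih =>
    intro h ans h0 h1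
    simp only [List.foldl_cons]
    by_cases hset : ed.1 = "setPassword"
    · rw [pvStepA_set _ _ hset, pvCalcA_eq_hashB]
      have hstB : pvStepB (h, ans) ed = (pvHashB ed.2, ans) := by
        simp [pvStepB, hset, pvHashB]
      rw [hstB]
      exact ih _ _ (pvHashB_range ed.2).1 (pvHashB_range ed.2).2
    · by_cases haut : ed.1 = "authorize"
      · have hstA : pvStepA (pvDb h, ans) ed
            = (pvDb h, ans ++ [if PySem.Set.contains (pvDb h) ed.2 then (1 : Int) else 0]) := by
          simp [pvStepA, hset, haut]
        have hstB : pvStepB (h, ans) ed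
            = (h, ans ++ [if PySem.Set.contains (pvDb h) ed.2 then (1 : Int) else 0]) := by
          simp only [pvStepB]
          rw [if_neg (by simp [hset]), if_pos (by simp [haut])]
          rw [← pvOk_eq h h0 h1 ed.2]
        rw [hstA, hstB]
        exact ih _ _ h0 h1
      · have hA : pvStepA (pvDb h, ans) ed = (pvDb h, ans) := by simp [pvStepA, hset, haut]
        have hB : pvStepB (h, ans) ed = (h, ans) := by simp [pvStepB, hset, haut]
        rw [hA, hB]
        exact ih _ _ h0 h1

-- prefix loop: before any setPassword (and, by Pre_, before any authorize)
lemma pvLoop_pre (evs : List (String × String)) : ∀ ans : List Int,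
    Pre_authEvents evs →
    (evs.foldl pvStepA (PySem.Set.empty, ans)).2 = (evs.foldl pvStepB (0, ans)).2 := by
  induction evs with
  | nil => intro ans _; rfl
  | cons ed evs ih =>
    intro ans hpre
    simp only [List.foldl_cons]
    by_cases hset : ed.1 = "setPassword"
    · rw [pvStepA_set _ _ hset, pvCalcA_eq_hashB]
      have hstB : pvStepB (0, ans) ed = (pvHashB ed.2, ans) := by
        simp [pvStepB, hset, pvHashB]
      rw [hstB]
      exact pvLoop_sync evs _ _ (pvHashB_range ed.2).1 (pvHashB_range ed.2).2
    · have haut : ¬ ed.1 = "authorize" := by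
        unfold Pre_authEvents at hpre
        rw [List.takeWhile_cons_of_pos (by simp [hset])] at hpre
        simp at hpre
        intro h; exact absurd h hpre.1
      have hpre' : Pre_authEvents evs := by
        unfold Pre_authEvents at hpre ⊢
        rw [List.takeWhile_cons_of_pos (by simp [hset])] at hpre
        simp at hpre
        simpa using hpre.2
      have hA : pvStepA (PySem.Set.empty, ans) ed = (PySem.Set.empty, ans) := by
        simp [pvStepA, hset, haut]
      have hB : pvStepB (0, ans) ed = (0, ans) := by simp [pvStepB, hset, haut]
      rw [hA, hB]
      exact ih ans hpre'

-- ===== VERDICT (by name: the statement is the Claim_ definition above) =====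
theorem authEvents_spec : Claim_equal_authEvents := by
  intro events _ hpre
  unfold Spec_authEvents authEvents authEvents_alt
  exact pvLoop_pre events [] hpre
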